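-- pv_equiv track=rewrite | github.com/duodaw/advent-2025 | 10/10.py | parse
-- ===== SOURCE A (Python) =====
-- def parse(line):
--     diagram = 0
--     buttons = []
--     button = []
--     in_diag = True
--     cnt = -1
--     for i in line:
--         cnt += 1
--         if i == '[' or i=='(' or i == ',' or i.strip()=='':
--             continue
--         if i == ']':
--             in_diag = False
--             continue
--         elif in_diag:
--             if i == '#':
--                 diagram |= (1 << cnt-1)
--         elif i == '{':
--             break
--         elif i == '(':
--             continue
--         elif i == ')':
--             buttons.append(button)
--             button = []
--         else:
--             button.append(int(i))
--     return diagram, buttons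
-- ===== SOURCE B (Python) =====
-- def parse(line):
--     head, _, rest = line.partition(']')
--     tail = rest.partition('{')[0]
--     diagram = sum(1 << (i - 1) for i, c in enumerate(head) if c == '#')
--     groups = [[int(c) for c in seg if c not in '[(, \t\n\r]'] for seg in tail.split(')')]
--     return diagram, groups[:-1]
-- ===== Notes on version B (the rewrite author's own statement) =====
-- stated objective: simpler
-- what changed: A walks the line once with a five-variable state machine (in_diag flag, counter, pending group); B instead decomposes the string first (partition at the first ']' and at '{', split the button section on ')') and computes the bitmask and the digit groups with comprehensions over the resulting pieces.
import Mathlib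
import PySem

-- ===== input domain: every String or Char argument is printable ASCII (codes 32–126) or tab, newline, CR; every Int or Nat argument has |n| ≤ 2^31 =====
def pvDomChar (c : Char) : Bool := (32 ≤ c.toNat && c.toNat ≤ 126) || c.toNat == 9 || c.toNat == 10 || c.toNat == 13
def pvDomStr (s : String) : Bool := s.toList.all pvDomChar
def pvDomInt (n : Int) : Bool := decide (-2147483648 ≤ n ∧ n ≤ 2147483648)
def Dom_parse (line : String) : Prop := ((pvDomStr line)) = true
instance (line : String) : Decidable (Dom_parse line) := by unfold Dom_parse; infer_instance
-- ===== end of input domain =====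

-- B replaces A's single-pass character state machine by string decomposition: partition at the
-- first ']' and at '{', split the button section on ')', then comprehensions; objective: simpler.

-- ===== PORT A =====
-- 1 << k (Python's shift; Pre_ keeps the shift amount nonnegative)
def pyShl1 (k : Nat) : Int := (1 : Int) <<< k

-- int(c) for a single character; exact on digit characters (Pre_ admits only digits here)
def pyIntChar (c : Char) : Int := (c.toNat : Int) - 48

-- c.strip() == '' for a single Dom character (ASCII whitespace)
def wsA (c : Char) : Bool := c == ' ' || c == '\t' || c == '\n' || c == '\r'

def parseA_loop : List Char → Int → List (List Int) → List Int → Bool → Int → Int × List (List Int)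
  | [], d, bs, _, _, _ => (d, bs)
  | c :: rest, d, bs, b, ind, cnt =>
    let cnt' := cnt + 1
    if c == '[' || c == '(' || c == ',' || wsA c then parseA_loop rest d bs b ind cnt'
    else if c == ']' then parseA_loop rest d bs b false cnt'
    else if ind then
      parseA_loop rest (if c == '#' then PySem.Int.bor d (pyShl1 (cnt' - 1).toNat) else d) bs b ind cnt'
    else if c == '{' then (d, bs)
    else if c == '(' then parseA_loop rest d bs b ind cnt'
    else if c == ')' then parseA_loop rest d (bs ++ [b]) [] ind cnt'
    else parseA_loop rest d bs (b ++ [pyIntChar c]) ind cnt'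

def parse (line : String) : Int × List (List Int) :=
  parseA_loop line.toList 0 [] [] true (-1)

-- ===== PORT B =====
-- c not in '[(, \t\n\r]'
def keepB (c : Char) : Bool :=
  !(c == '[' || c == '(' || c == ',' || c == ' ' || c == '\t' || c == '\n' || c == '\r' || c == ']')

-- [int(c) for c in seg if c not in '[(, \t\n\r]']
def gdigits (seg : List Char) : List Int :=
  (seg.filter keepB).map (fun c => (c.toNat : Int) - 48)

def parse_alt (line : String) : Int × List (List Int) :=
  let chars := line.toList
  let head := chars.takeWhile (fun c => !(c == ']'))
  let rest := (chars.dropWhile (fun c => !(c == ']'))).drop 1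
  let tail := rest.takeWhile (fun c => !(c == '{'))
  let diagram := (((PySem.List.enumerate head 0).filter (fun p => p.2 == '#')).map
    (fun p => pyShl1 (p.1 - 1).toNat)).sum
  let groups := (tail.splitOn ')').map gdigits
  (diagram, groups.dropLast)

-- ===== PRECONDITION & SPEC =====
-- characters on which A's int() does not raise after the ']' boundary
def okTail (c : Char) : Bool :=
  c == '[' || c == '(' || c == ',' || wsA c || c == ']' || c == ')' || PySem.Chars.isdigit c

-- Pre_ excludes exactly the inputs on which the Python A raises ValueError: a '#' at index 0
-- (1 << -1) and any stray non-digit character between the first ']' and the first '{' after it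
-- (B raises there too).
def Pre_parse (line : String) : Prop :=
  line.toList.head? ≠ some '#' ∧
  (((line.toList.dropWhile (fun c => !(c == ']'))).drop 1).takeWhile (fun c => !(c == '{'))).all okTail = true
instance (line : String) : Decidable (Pre_parse line) := by unfold Pre_parse; infer_instance

def pvWitness_parse : String := "[## ] (1,2) (3) {x"

def Spec_parse (line : String) (out : Int × List (List Int)) : Prop := out = parse_alt line
instance (line : String) (out : Int × List (List Int)) : Decidable (Spec_parse line out) := by unfold Spec_parse; infer_instance

-- ===== CLAIM (what is proved, stated in full; the proofs are below) =====
def Claim_equal_parse : Prop := ∀ (line : String), Dom_parse line → Pre_parse line → Spec_parse line (parse line)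

-- ===== LEMMAS AND PROOFS =====

-- A's buttons phase, abstracted: groups closed by ')', pending group dropped at the end
def segGroups : List Char → List Int → List (List Int)
  | [], _ => []
  | c :: r, g =>
    if c == ')' then g :: segGroups r []
    else segGroups r (if PySem.Chars.isdigit c then g ++ [(c.toNat : Int) - 48] else g)

-- A's '#'-bit accumulation, indexed by the absolute index of the first character
def bitsFrom : List Char → Int → Int → Int
  | [], d, _ => d
  | c :: r, d, i => bitsFrom r (if c == '#' then PySem.Int.bor d (pyShl1 (i - 1).toNat) else d) (i + 1)

theorem nat_lor_two_pow (k : ℕ) : ∀ m : ℕ, m < 2 ^ k → m ||| (1 <<< k) = m + (1 <<< k) := by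
  induction k with
  | zero => intro m hm; interval_cases m; decide
  | succ k ih =>
    intro m hm
    have hbit : Nat.bit (m.testBit 0) (m >>> 1) = m := Nat.bit_testBit_zero_shiftRight_one m
    have h2 : (1 <<< (k+1)) = Nat.bit false (1 <<< k) := by
      simp [Nat.bit, Nat.shiftLeft_eq]; ring
    have hq : m >>> 1 < 2 ^ k := by
      simp [Nat.shiftRight_succ, Nat.shiftRight_zero] at *
      omega
    calc m ||| (1 <<< (k+1)) = Nat.bit (m.testBit 0) (m >>> 1) ||| Nat.bit false (1 <<< k) := by rw [hbit, h2]
    _ = Nat.bit (m.testBit 0 || false) ((m >>> 1) ||| (1 <<< k)) := Nat.lor_bit _ _ _ _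
    _ = Nat.bit (m.testBit 0) ((m >>> 1) + (1 <<< k)) := by rw [ih _ hq, Bool.or_false]
    _ = m + (1 <<< (k+1)) := by
        cases hb : m.testBit 0 <;>
          · rw [hb] at hbit
            simp [Nat.bit, Nat.shiftLeft_eq, Nat.shiftRight_succ, Nat.shiftRight_zero] at hbit ⊢
            omega

theorem pyShl1_cast (k : ℕ) : pyShl1 k = ((1 <<< k : ℕ) : ℤ) := by simp [pyShl1, Nat.shiftLeft_eq, Int.shiftLeft_eq]

theorem int_bor_cast (m n : ℕ) : PySem.Int.bor (m : ℤ) (n : ℤ) = ((m ||| n : ℕ) : ℤ) := by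
  simp [PySem.Int.bor_natCast]

theorem buttons_phase : ∀ (l : List Char) (d : Int) (bs : List (List Int)) (b : List Int) (cnt : Int),
    (∀ c ∈ l.takeWhile (fun c => !(c == '{')), okTail c = true) →
    parseA_loop l d bs b false cnt = (d, bs ++ segGroups (l.takeWhile (fun c => !(c == '{'))) b) := by
  intro l
  induction l with
  | nil => intro d bs b cnt _; simp [parseA_loop, segGroups]
  | cons c rest ih =>
    intro d bs b cnt hok
    by_cases hbrace : c = '{'
    · subst hbrace; simp [parseA_loop, segGroups, wsA]
    · have htw : (c :: rest).takeWhile (fun c => !(c == '{')) = c :: rest.takeWhile (fun c => !(c == '{')) := by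
        simp [List.takeWhile_cons, hbrace]
      have hc : okTail c = true := by apply hok; rw [htw]; exact List.mem_cons_self
      have hrest : ∀ x ∈ rest.takeWhile (fun c => !(c == '{')), okTail x = true := by
        intro x hx; apply hok; rw [htw]; exact List.mem_cons_of_mem _ hx
      simp only [okTail, Bool.or_eq_true, beq_iff_eq] at hc
      rcases hc with ((((((h | h) | h) | h) | h) | h) | h)
      · subst h; simp [parseA_loop, htw, segGroups, wsA, PySem.Chars.isdigit, ih _ _ _ _ hrest]
      · subst h; simp [parseA_loop, htw, segGroups, wsA, PySem.Chars.isdigit, ih _ _ _ _ hrest]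
      · subst h; simp [parseA_loop, htw, segGroups, wsA, PySem.Chars.isdigit, ih _ _ _ _ hrest]
      · simp only [wsA, Bool.or_eq_true, beq_iff_eq] at h
        rcases h with ((h | h) | h) | h <;>
          (subst h; simp [parseA_loop, htw, segGroups, wsA, PySem.Chars.isdigit, ih _ _ _ _ hrest])
      · subst h; simp [parseA_loop, htw, segGroups, wsA, PySem.Chars.isdigit, ih _ _ _ _ hrest]
      · subst h; simp [parseA_loop, htw, segGroups, wsA, PySem.Chars.isdigit, ih _ _ _ _ hrest]
      · have h0 : ('0' : Char).toNat ≤ c.toNat ∧ c.toNat ≤ ('9' : Char).toNat := by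
          simpa [PySem.Chars.isdigit] using h
        have hne : ∀ x : Char, x ∈ (['[', '(', ',', ' ', '\t', '\n', '\r', ']', '{', ')'] : List Char) → c ≠ x := by
          intro x hx hcx; subst hcx; revert h0; fin_cases hx <;> simp [Char.toNat] <;> omega
        simp only [List.mem_cons, List.mem_singleton, forall_eq_or_imp, forall_eq] at hne
        obtain ⟨h1, h2, h3, h4, h5, h6, h7, h8, h9, h10⟩ := hne
        simp [parseA_loop, htw, segGroups, wsA, h1, h2, h3, h4, h5, h6, h7, h8, h9, h10, h,
          pyIntChar, ih _ _ _ _ hrest]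

theorem diag_phase : ∀ (l : List Char) (d : Int) (bs : List (List Int)) (b : List Int) (cnt : Int),
    (∀ c ∈ (((l.dropWhile (fun c => !(c == ']'))).drop 1).takeWhile (fun c => !(c == '{'))), okTail c = true) →
    parseA_loop l d bs b true cnt =
      (bitsFrom (l.takeWhile (fun c => !(c == ']'))) d (cnt + 1),
       bs ++ segGroups (((l.dropWhile (fun c => !(c == ']'))).drop 1).takeWhile (fun c => !(c == '{'))) b) := by
  intro l
  induction l with
  | nil => intro d bs b cnt _; simp [parseA_loop, bitsFrom, segGroups]
  | cons c rest ih =>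
    intro d bs b cnt hok
    by_cases hc : c = ']'
    · subst hc
      have hok' : ∀ x ∈ rest.takeWhile (fun c => !(c == '{')), okTail x = true := by
        simpa [List.dropWhile_cons] using hok
      simp [parseA_loop, bitsFrom, wsA, buttons_phase rest d bs b (cnt + 1) hok']
    · have hok' : ∀ x ∈ (((rest.dropWhile (fun c => !(c == ']'))).drop 1).takeWhile (fun c => !(c == '{'))), okTail x = true := by
        simpa [List.dropWhile_cons, hc] using hok
      have step : parseA_loop (c :: rest) d bs b true cnt =
          parseA_loop rest (if c == '#' then PySem.Int.bor d (pyShl1 ((cnt + 1) - 1).toNat) else d) bs b true (cnt + 1) := by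
        by_cases hskip : (c == '[' || c == '(' || c == ',' || wsA c) = true
        · have hnh : c ≠ '#' := by
            rcases (by simpa [wsA] using hskip : ((c = '[' ∨ c = '(') ∨ c = ',') ∨ ((c = ' ' ∨ c = '\t') ∨ c = '\n') ∨ c = '\r') with ((h|h)|h)|((h|h)|h)|h <;> simp [h]
          simp [parseA_loop, hskip, hnh]
        · simp [parseA_loop, hskip, hc]
      rw [step, ih _ _ _ _ hok']
      simp [List.takeWhile_cons, List.dropWhile_cons, hc, bitsFrom]

theorem bits_sum : ∀ (l : List Char) (m : ℕ) (i : Int), 1 ≤ i → m < 2 ^ (i - 1).toNat →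
    bitsFrom l (m : Int) i =
      (m : Int) + (((PySem.List.enumerate l i).filter (fun p => p.2 == '#')).map
        (fun p => pyShl1 (p.1 - 1).toNat)).sum := by
  intro l
  induction l with
  | nil => intro m i _ _; simp [bitsFrom, PySem.List.enumerate_nil]
  | cons c r ih =>
    intro m i hi hm
    have hto : i.toNat = (i - 1).toNat + 1 := by omega
    have hstep : ((i + 1) - 1).toNat = i.toNat := by omega
    by_cases hc : c = '#'
    · subst hc
      have hk : pyShl1 (i - 1).toNat = ((1 <<< (i - 1).toNat : ℕ) : ℤ) := pyShl1_cast _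
      have hd : PySem.Int.bor (m : ℤ) (pyShl1 (i - 1).toNat)
          = ((m + 1 <<< (i - 1).toNat : ℕ) : ℤ) := by
        rw [hk, int_bor_cast, nat_lor_two_pow _ _ hm]
      have hm' : m + 1 <<< (i - 1).toNat < 2 ^ ((i + 1) - 1).toNat := by
        rw [hstep, hto, Nat.shiftLeft_eq, pow_succ]
        simp [Nat.shiftLeft_eq] at hm ⊢
        omega
      have hrec := ih (m + 1 <<< (i - 1).toNat) (i + 1) (by omega) hm'
      rw [show bitsFrom ('#' :: r) (m : ℤ) i
            = bitsFrom r (PySem.Int.bor (m : ℤ) (pyShl1 (i - 1).toNat)) (i + 1) from rfl,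
          hd, hrec, PySem.List.enumerate_cons, List.filter_cons_of_pos (by simp),
          List.map_cons, List.sum_cons, Nat.cast_add, ← hk]
      ring
    · have hm2 : m < 2 ^ ((i + 1) - 1).toNat := by
        rw [hstep, hto]
        calc m < 2 ^ (i - 1).toNat := hm
        _ ≤ 2 ^ ((i - 1).toNat + 1) := Nat.pow_le_pow_right (by norm_num) (by omega)
      have := ih m (i + 1) (by omega) hm2
      simp [bitsFrom, PySem.List.enumerate_cons, List.filter_cons, hc, this]

theorem keepB_eq_isdigit (c : Char) (hok : okTail c = true) (hc : c ≠ ')') :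
    keepB c = PySem.Chars.isdigit c := by
  simp only [okTail, Bool.or_eq_true, beq_iff_eq] at hok
  rcases hok with ((((((h | h) | h) | h) | h) | h) | h)
  · subst h; decide
  · subst h; decide
  · subst h; decide
  · simp only [wsA, Bool.or_eq_true, beq_iff_eq] at h
    rcases h with ((h | h) | h) | h <;> (subst h; decide)
  · subst h; decide
  · exact absurd h hc
  · have h0 : ('0' : Char).toNat ≤ c.toNat ∧ c.toNat ≤ ('9' : Char).toNat := by
      simpa [PySem.Chars.isdigit] using h
    have hne : ∀ x : Char, x ∈ (['[', '(', ',', ' ', '\t', '\n', '\r', ']'] : List Char) → c ≠ x := by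
      intro x hx hcx; subst hcx; revert h0; fin_cases hx <;> simp [Char.toNat] <;> omega
    simp only [List.mem_cons, List.mem_singleton, forall_eq_or_imp, forall_eq] at hne
    obtain ⟨h1, h2, h3, h4, h5, h6, h7, h8⟩ := hne
    simp [keepB, h, h1, h2, h3, h4, h5, h6, h7, h8]

theorem groups_bridge : ∀ (t : List Char) (g : List Int),
    (∀ c ∈ t, okTail c = true) →
    segGroups t g = (((t.splitOn ')').map gdigits).modifyHead (fun s => g ++ s)).dropLast := by
  intro t
  induction t with
  | nil => intro g _; simp [segGroups, List.splitOn, List.splitOnP_nil, gdigits]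
  | cons c r ih =>
    intro g hok
    have hokr : ∀ x ∈ r, okTail x = true := fun x hx => hok x (List.mem_cons_of_mem _ hx)
    obtain ⟨s, ss, hsp⟩ := List.exists_cons_of_ne_nil (List.splitOnP_ne_nil (p := (· == ')')) r)
    by_cases hc : c = ')'
    · subst hc
      have hL : (r.splitOn ')').map gdigits ≠ [] := by
        simp [List.splitOn, hsp]
      rw [show segGroups (')' :: r) g = g :: segGroups r [] from by simp [segGroups]]
      rw [ih [] hokr]
      simp only [List.splitOn, List.splitOnP_cons, beq_self_eq_true, if_true, List.map_cons,
        List.modifyHead_cons]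
      rw [List.dropLast_cons_of_ne_nil (by simpa [List.splitOn] using hL)]
      simp only [gdigits, List.filter_nil, List.map_nil, List.append_nil]
      rw [show (fun s : List Int => [] ++ s) = @id (List Int) from by funext s; simp,
        List.modifyHead_id]
      rfl
    · have hkd : keepB c = PySem.Chars.isdigit c :=
        keepB_eq_isdigit c (hok c List.mem_cons_self) hc
      have hstep : segGroups (c :: r) g
          = segGroups r (if PySem.Chars.isdigit c then g ++ [(c.toNat : Int) - 48] else g) := by
        simp [segGroups, hc]
      rw [hstep, ih _ hokr]
      have hfalse : (c == ')') = false := by simpa using hc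
      simp only [List.splitOn, List.splitOnP_cons, hfalse, Bool.false_eq_true, if_false, hsp,
        List.modifyHead_cons, List.map_cons]
      congr 2
      rw [show gdigits (c :: s) = if keepB c then ((c.toNat : Int) - 48) :: gdigits s else gdigits s from by
        by_cases hb : keepB c <;> simp [gdigits, List.filter_cons, hb]]
      rw [hkd]
      by_cases hd : PySem.Chars.isdigit c <;> simp [hd, hkd]

theorem diag_head (l : List Char) (hh : l.head? ≠ some '#') :
    bitsFrom (l.takeWhile (fun c => !(c == ']'))) 0 0 =
      (((PySem.List.enumerate (l.takeWhile (fun c => !(c == ']'))) 0).filter (fun p => p.2 == '#')).map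
        (fun p => pyShl1 (p.1 - 1).toNat)).sum := by
  cases l with
  | nil => simp [bitsFrom, PySem.List.enumerate_nil]
  | cons x r =>
    by_cases hx : x = ']'
    · subst hx; simp [List.takeWhile_cons, bitsFrom, PySem.List.enumerate_nil]
    · have hxh : x ≠ '#' := by intro h; apply hh; simp [h]
      rw [show (x :: r).takeWhile (fun c => !(c == ']')) = x :: r.takeWhile (fun c => !(c == ']'))
        from by simp [List.takeWhile_cons, hx]]
      rw [show bitsFrom (x :: r.takeWhile (fun c => !(c == ']'))) 0 0
            = bitsFrom (r.takeWhile (fun c => !(c == ']'))) 0 1 from by simp [bitsFrom, hxh]]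
      have hb := bits_sum (r.takeWhile (fun c => !(c == ']'))) 0 1 (by norm_num) (by norm_num)
      simp only [Nat.cast_zero, zero_add] at hb
      rw [hb, PySem.List.enumerate_cons, List.filter_cons_of_neg (by simp [hxh])]
      norm_num

theorem seg_drop (t : List Char) (hok : ∀ c ∈ t, okTail c = true) :
    segGroups t [] = ((t.splitOn ')').map gdigits).dropLast := by
  rw [groups_bridge t [] hok]
  rw [show (fun s : List Int => [] ++ s) = @id (List Int) from by funext s; simp,
    List.modifyHead_id]
  rfl

theorem parse_eq (line : String)
    (hh : line.toList.head? ≠ some '#')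
    (hok : (((line.toList.dropWhile (fun c => !(c == ']'))).drop 1).takeWhile (fun c => !(c == '{'))).all okTail = true) :
    parse line = parse_alt line := by
  have hok' := (List.all_eq_true).mp hok
  unfold parse parse_alt
  rw [diag_phase line.toList 0 [] [] (-1) hok']
  rw [show (-1 : ℤ) + 1 = 0 from by norm_num, List.nil_append]
  rw [diag_head line.toList hh, seg_drop _ hok']

-- ===== VERDICT (by name: the statement is the Claim_ definition above) =====
theorem parse_spec : Claim_equal_parse := by
  intro line _ hpre
  unfold Spec_parse
  exact parse_eq line hpre.1 hpre.2
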